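-- pv_equiv track=rewrite | github.com/adubois85/python_projects | impractical_python/chapter1/poor_mans_bar_chart.py | etaoin
-- ===== SOURCE A (Python) =====
-- def etaoin(text: str) -> dict:
--     letters = 'abcdefghijklmnopqrstuvwxyz'
--     text = text.lower()
--     count_dict = {}
--     for i in range(len(letters)):
--         count_dict[letters[i]] = ''
--     for i in range(len(text)):
--         if text[i] in letters:
--             # the Unicode endpoint for the full block character
--             count_dict[text[i]] += "\u2588"
--     return count_dict
-- ===== SOURCE B (Python) =====
-- def etaoin(text: str) -> dict:
--     low = text.lower()
--     return {c: "\u2588" * low.count(c) for c in 'abcdefghijklmnopqrstuvwxyz'}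
-- ===== Notes on version B (the rewrite author's own statement) =====
-- stated objective: faster
-- what changed: B keeps no counting dict at all: it loops over the fixed 26-letter alphabet and renders each bar directly from str.count over the lowered text (26 independent C-level scans and one string multiplication each), instead of A's single Python-level pass mutating a pre-seeded dict by per-character string concatenation.
import Mathlib
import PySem

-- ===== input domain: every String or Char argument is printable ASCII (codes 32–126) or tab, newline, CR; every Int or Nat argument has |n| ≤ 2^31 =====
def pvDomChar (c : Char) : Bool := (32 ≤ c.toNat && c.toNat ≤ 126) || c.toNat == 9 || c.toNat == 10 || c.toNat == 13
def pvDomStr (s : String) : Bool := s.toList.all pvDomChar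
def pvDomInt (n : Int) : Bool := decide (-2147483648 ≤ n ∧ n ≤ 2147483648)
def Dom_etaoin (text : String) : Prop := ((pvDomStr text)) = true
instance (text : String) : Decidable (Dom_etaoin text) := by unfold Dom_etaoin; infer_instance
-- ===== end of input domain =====

-- B drops A's mutated dict entirely: it loops over the fixed alphabet and renders each bar
-- from a direct count of that letter in the lowered text (26 independent scans).


-- ===== PORT A =====
-- strings are handled on the char-list side (exact per the PySem bridge); the pyGetD defaults
-- are never used: every index produced by range(len(..)) is in range; 'text[i] in letters' for
-- the 1-char string text[i] is char membership.
def etaoin (text : String) : List (String × String) :=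
  let letters : List Char := "abcdefghijklmnopqrstuvwxyz".toList
  let t : List Char := (PySem.Str.lower text).toList
  let d0 : PySem.Dict String String :=
    (PySem.List.pyRange 0 (letters.length : Int) 1).foldl
      (fun d i => d.insert (String.ofList [PySem.List.pyGetD letters i 'a']) "") PySem.Dict.empty
  let d1 : PySem.Dict String String :=
    (PySem.List.pyRange 0 (t.length : Int) 1).foldl
      (fun d i =>
        if letters.contains (PySem.List.pyGetD t i ' ') then
          d.insert (String.ofList [PySem.List.pyGetD t i ' '])
            (d.getD (String.ofList [PySem.List.pyGetD t i ' ']) "" ++ "\u2588")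
        else d) d0
  d1.items

-- ===== PORT B =====
-- low.count(c) for a single-character needle is exactly the character count, ported as List.count.
def etaoin_alt (text : String) : List (String × String) :=
  let low : List Char := (PySem.Str.lower text).toList
  "abcdefghijklmnopqrstuvwxyz".toList.map (fun c =>
    (String.ofList [c], String.ofList (List.replicate (low.count c) '\u2588')))

-- ===== PRECONDITION & SPEC =====
def Spec_etaoin (text : String) (out : List (String × String)) : Prop := out = etaoin_alt text
instance (text : String) (out : List (String × String)) : Decidable (Spec_etaoin text out) := by unfold Spec_etaoin; infer_instance

-- ===== CLAIM (what is proved, stated in full; the proofs are below) =====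
def Claim_equal_etaoin : Prop := ∀ (text : String), Dom_etaoin text → Spec_etaoin text (etaoin text)

-- ===== LEMMAS AND PROOFS =====

-- A's accumulation loop, characterised: it appends to each existing entry one block per
-- occurrence of that entry's letter, provided every letter's key is already present.
theorem foldA_items (L l : List Char) (d : PySem.Dict String String)
    (hnd : d.keys.Nodup)
    (hc : ∀ c, L.contains c = true → d.contains (String.ofList [c]) = true) :
    (l.foldl (fun d c =>
        if L.contains c then
          d.insert (String.ofList [c]) (d.getD (String.ofList [c]) "" ++ "\u2588")
        else d) d).items
      = d.items.map (fun kv =>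
          (kv.1, kv.2 ++ String.ofList (List.replicate
              (l.countP (fun c => L.contains c && (String.ofList [c] == kv.1))) '\u2588'))) := by
  induction l generalizing d with
  | nil => simp
  | cons c rest ih =>
    by_cases h : L.contains c = true
    · have hcl : c ∈ L := by simpa using h
      rw [List.foldl_cons, if_pos h]
      have hcc := hc c h
      have hnd' : (d.insert (String.ofList [c])
          (d.getD (String.ofList [c]) "" ++ "\u2588")).keys.Nodup := by
        rw [PySem.Dict.keys_insert_of_contains d _ hcc]; exact hnd
      have hc' : ∀ c', L.contains c' = true →
          (d.insert (String.ofList [c])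
            (d.getD (String.ofList [c]) "" ++ "\u2588")).contains (String.ofList [c']) = true := by
        intro c' h'
        rw [PySem.Dict.contains_insert]
        simp [hc c' h']
      rw [ih _ hnd' hc', PySem.Dict.items_insert_of_contains d _ hcc, List.map_map]
      apply List.map_congr_left
      intro kv hkv
      obtain ⟨k1, k2⟩ := kv
      by_cases hk : k1 = String.ofList [c]
      · subst hk
        have hv : d.getD (String.ofList [c]) "" = k2 :=
          PySem.Dict.getD_of_mem_items d hkv hnd ""
        simp only [Function.comp_apply]
        rw [if_pos (beq_self_eq_true _), hv]
        simp only [List.countP_cons]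
        rw [if_pos (by simp [hcl])]
        refine Prod.ext rfl ?_
        show k2 ++ "\u2588" ++ _ = k2 ++ _
        rw [String.append_assoc]
        congr 1
        rw [List.replicate_succ,
          show ("\u2588" : String) = String.ofList ['\u2588'] from rfl, ← String.ofList_append]
        rfl
      · have h2 : (String.ofList [c] == k1) = false := by
          rw [beq_eq_false_iff_ne]; exact fun hh => hk hh.symm
        simp only [Function.comp_apply, List.countP_cons]
        rw [if_neg (by simpa using hk), h2, Bool.and_false]
        simp
    · have h' : c ∉ L := by simpa using h
      rw [List.foldl_cons, if_neg (by simp [h']), ih _ hnd hc]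
      apply List.map_congr_left
      intro kv _
      simp only [List.countP_cons]
      rw [if_neg (by simp [h'])]
      simp

set_option maxHeartbeats 1000000 in
theorem etaoin_spec_aux (text : String) : etaoin text = etaoin_alt text := by
  simp only [etaoin, etaoin_alt]
  rw [PySem.List.foldl_pyRange_zero_pyGetD' _ 'a'
      (fun (d : PySem.Dict String String) c => d.insert (String.ofList [c]) "")]
  rw [PySem.List.foldl_pyRange_zero_pyGetD' _ ' '
      (fun (d : PySem.Dict String String) c =>
        if ("abcdefghijklmnopqrstuvwxyz".toList).contains c then
          d.insert (String.ofList [c]) (d.getD (String.ofList [c]) "" ++ "\u2588")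
        else d)]
  have hinj : Function.Injective (fun c : Char => String.ofList [c]) := by
    intro a b hh; simpa using String.ofList_inj.mp hh
  have hLnd : ("abcdefghijklmnopqrstuvwxyz".toList).Nodup := by decide
  have hempty : (PySem.Dict.empty : PySem.Dict String String).items = [] := rfl
  -- the seeding loop: 26 fresh distinct keys
  have hfresh := PySem.Dict.items_foldl_insert_fresh
    ("abcdefghijklmnopqrstuvwxyz".toList) (fun c => String.ofList [c]) (fun _ => "")
    PySem.Dict.empty (by intro a _; simp [PySem.Dict.contains_empty]) (hLnd.map hinj)
  have hkeys : (("abcdefghijklmnopqrstuvwxyz".toList).foldl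
      (fun (d : PySem.Dict String String) c => d.insert (String.ofList [c]) "")
      PySem.Dict.empty).keys
      = ("abcdefghijklmnopqrstuvwxyz".toList).map (fun c => String.ofList [c]) := by
    show (List.map Prod.fst _) = _
    rw [hfresh, hempty]
    simp
  rw [foldA_items _ _ _ (by rw [hkeys]; exact hLnd.map hinj)
      (by
        intro c hcL
        rw [PySem.Dict.contains_iff_mem_keys, hkeys]
        exact List.mem_map_of_mem (by simpa using hcL))]
  rw [hfresh, hempty, List.nil_append, List.map_map]
  apply List.map_congr_left
  intro c hcL
  have hmem : ("abcdefghijklmnopqrstuvwxyz".toList).contains c = true := by simpa using hcL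
  refine Prod.ext rfl ?_
  show "" ++ _ = _
  rw [String.empty_append]
  congr 1
  congr 1
  -- countP of this letter's predicate = plain count of the letter
  rw [List.count_eq_countP]
  apply List.countP_congr
  intro x _
  by_cases hx : x = c
  · subst hx
    simp only [beq_self_eq_true, Bool.and_true]
    simpa using hmem
  · have : (String.ofList [x] == String.ofList [c]) = false := by
      rw [beq_eq_false_iff_ne]
      exact fun hh => hx (by simpa using String.ofList_inj.mp hh)
    simp [this, hx]

-- ===== VERDICT (by name: the statement is the Claim_ definition above) =====
theorem etaoin_spec : Claim_equal_etaoin := by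
  intro text _
  unfold Spec_etaoin
  exact etaoin_spec_aux text
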